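-- pv_equiv track=rewrite | github.com/TheWelcomer/MorphSeg | library/morpheme_segmenter.py | _extract_boundaries
-- ===== SOURCE A (Python) =====
-- def _extract_boundaries(segmentation: str, delimiter: str = " @@") -> set:
--     boundaries = set()
--     pos = 0
--     segments = segmentation.split(delimiter)
--     for i, segment in enumerate(segments[:-1]):
--         pos += len(segment)
--         boundaries.add(pos)
--     return boundaries
-- ===== SOURCE B (Python) =====
-- def _extract_boundaries(segmentation: str, delimiter: str = " @@") -> set:
--     if not delimiter:
--         raise ValueError("empty separator")
--     boundaries = set()
--     count = 0
--     start = 0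
--     while True:
--         idx = segmentation.find(delimiter, start)
--         if idx == -1:
--             return boundaries
--         boundaries.add(idx - count * len(delimiter))
--         count += 1
--         start = idx + len(delimiter)
-- ===== Notes on version B (the rewrite author's own statement) =====
-- stated objective: alternative
-- what changed: B scans the string with str.find instead of materializing the split list, computing each boundary as delimiter-index minus delimiters-seen*len(delimiter); Pre_ excludes the empty delimiter, on which A's str.split raises ValueError (B raises ValueError there too).
import Mathlib
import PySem

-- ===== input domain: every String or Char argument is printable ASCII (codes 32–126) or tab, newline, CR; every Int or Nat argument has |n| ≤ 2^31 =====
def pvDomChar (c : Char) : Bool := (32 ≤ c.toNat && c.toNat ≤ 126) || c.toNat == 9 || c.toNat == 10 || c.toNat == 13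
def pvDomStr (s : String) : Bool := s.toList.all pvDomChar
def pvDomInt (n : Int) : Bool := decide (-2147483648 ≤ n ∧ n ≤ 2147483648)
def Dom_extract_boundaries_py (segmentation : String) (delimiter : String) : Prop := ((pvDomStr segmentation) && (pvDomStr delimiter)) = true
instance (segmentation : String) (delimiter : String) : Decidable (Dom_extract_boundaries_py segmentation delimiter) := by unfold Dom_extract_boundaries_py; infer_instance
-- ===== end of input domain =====

-- B scans the string with str.find instead of materializing the split list; same O(n) cost, different algorithm.


-- ===== PORT A =====
-- boundaries = set(); pos = 0; segments = segmentation.split(delimiter)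
-- for segment in segments[:-1]: pos += len(segment); boundaries.add(pos)   (the enumerate index i is unused)
def extract_boundaries_py (segmentation : String) (delimiter : String) : List Int :=
  match PySem.Str.split? segmentation delimiter with
  | none => []  -- delimiter = "": Python raises ValueError here (excluded by Pre_)
  | some segments =>
    ((PySem.List.slice segments none (some (-1))).foldl
      (fun (st : PySem.Set Int × Int) seg =>
        (PySem.Set.add st.1 (st.2 + PySem.Str.len seg), st.2 + PySem.Str.len seg))
      (PySem.Set.empty, 0)).1

-- ===== PORT B =====
-- while True: idx = segmentation.find(delimiter, start); if idx == -1: return boundaries;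
--   boundaries.add(idx - count*len(delimiter)); count += 1; start = idx + len(delimiter)
-- (the fuel parameter len(segmentation)+1 only makes the loop total: start grows by at
--  least 1 per iteration and the loop stops once start exceeds len(segmentation))
def extract_boundaries_py_alt_go (s d : String) : Nat → Nat → Nat → PySem.Set Int → PySem.Set Int
  | 0, _, _, boundaries => boundaries
  | fuel + 1, count, start, boundaries =>
    let idx := PySem.Str.findFrom s d (start : Int)
    if idx = -1 then boundaries
    else
      extract_boundaries_py_alt_go s d fuel (count + 1) (idx.toNat + d.toList.length)
        (PySem.Set.add boundaries (idx - (count : Int) * PySem.Str.len d))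

def extract_boundaries_py_alt (segmentation : String) (delimiter : String) : List Int :=
  if delimiter.toList = [] then []  -- empty delimiter: Python B raises ValueError (excluded by Pre_)
  else extract_boundaries_py_alt_go segmentation delimiter (segmentation.toList.length + 1) 0 0 PySem.Set.empty

-- ===== PRECONDITION & SPEC =====
-- Pre_ excludes only the empty delimiter, on which A's str.split raises ValueError (B raises ValueError too).
def Pre_extract_boundaries_py (segmentation : String) (delimiter : String) : Prop := delimiter ≠ ""
instance (segmentation : String) (delimiter : String) : Decidable (Pre_extract_boundaries_py segmentation delimiter) := by unfold Pre_extract_boundaries_py; infer_instance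
def pvWitness_extract_boundaries_py : String × String := ("un @@do @@ing", " @@")
def Spec_extract_boundaries_py (segmentation : String) (delimiter : String) (out : List Int) : Prop := out = extract_boundaries_py_alt segmentation delimiter
instance (segmentation : String) (delimiter : String) (out : List Int) : Decidable (Spec_extract_boundaries_py segmentation delimiter out) := by unfold Spec_extract_boundaries_py; infer_instance

-- ===== CLAIM (what is proved, stated in full; the proofs are below) =====
def Claim_equal_extract_boundaries_py : Prop := ∀ (segmentation : String) (delimiter : String), Dom_extract_boundaries_py segmentation delimiter → Pre_extract_boundaries_py segmentation delimiter → Spec_extract_boundaries_py segmentation delimiter (extract_boundaries_py segmentation delimiter)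

-- ===== LEMMAS AND PROOFS =====

theorem pvFindFrom_bounds (s d : List Char) (start : Nat)
    (h : PySem.Chars.findFrom s d (start : Int) none ≠ -1) :
    start ≤ s.length ∧ (start : Int) ≤ PySem.Chars.findFrom s d (start : Int) none ∧
      PySem.Chars.findFrom s d (start : Int) none ≤ (s.length : Int) := by
  by_cases hk : start ≤ s.length
  · refine ⟨hk, (PySem.Chars.findFrom_natCast_spec s d start hk h).1, ?_⟩
    rw [PySem.Chars.findFrom_natCast s d start hk] at h ⊢
    split_ifs at h ⊢ with h1
    · omega
    · have := PySem.Chars.find_le_length (List.drop start s) d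
      simp [List.length_drop] at this
      omega
  · exfalso
    apply h
    simp only [PySem.Chars.findFrom]
    split_ifs with h2 <;> omega


theorem pv_find_go_shift (sub s : List Char) (k : Nat) :
    PySem.Chars.find.go sub s k =
      if PySem.Chars.find.go sub s 0 = -1 then -1 else (k : Int) + PySem.Chars.find.go sub s 0 := by
  induction s generalizing k with
  | nil =>
    by_cases he : sub.isEmpty <;> simp [PySem.Chars.find.go, he]
  | cons c rest ih =>
    by_cases h1 : sub.isPrefixOf (c :: rest)
    · simp [PySem.Chars.find.go, h1]
    · simp only [PySem.Chars.find.go, h1, if_false, Bool.false_eq_true]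
      rw [ih (k + 1), ih (0 + 1)]
      have hge : -1 ≤ PySem.Chars.find.go sub rest 0 := PySem.Chars.neg_one_le_find rest sub
      split_ifs <;> push_cast <;> omega

theorem pv_find_cons (sub : List Char) (c : Char) (rest : List Char) :
    PySem.Chars.find (c :: rest) sub =
      if sub.isPrefixOf (c :: rest) then 0
      else if PySem.Chars.find rest sub = -1 then -1 else 1 + PySem.Chars.find rest sub := by
  show PySem.Chars.find.go sub (c :: rest) 0 = _
  by_cases h1 : sub.isPrefixOf (c :: rest)
  · simp [PySem.Chars.find.go, h1]
  · simp only [PySem.Chars.find.go, h1, if_false, Bool.false_eq_true]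
    rw [pv_find_go_shift sub rest (0 + 1)]
    simp only [PySem.Chars.find]
    split_ifs <;> push_cast <;> omega

theorem pv_find_nil (sub : List Char) (h : sub ≠ []) : PySem.Chars.find [] sub = -1 := by
  show PySem.Chars.find.go sub [] 0 = -1
  simp [PySem.Chars.find.go, List.isEmpty_iff, h]

-- reference decomposition: the split of s at the successive first occurrences of d
def pvSplitList (d : List Char) (hd : d ≠ []) (s : List Char) : List (List Char) :=
  let k := PySem.Chars.find s d
  if h : k = -1 then [s]
  else List.take k.toNat s :: pvSplitList d hd (List.drop (k.toNat + d.length) s)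
  termination_by s.length
  decreasing_by
    have hk0 : 0 ≤ PySem.Chars.find s d := by
      have := PySem.Chars.neg_one_le_find s d
      omega
    have hinf : d <:+: s := (PySem.Chars.find_nonneg_iff s d).mp hk0
    have h1 : d.length ≤ s.length := hinf.length_le
    have hd1 : 1 ≤ d.length := by cases hl : d with | nil => exact absurd hl hd | cons a l => simp
    simp [List.length_drop]
    omega

theorem pvSplitList_ne_nil (d : List Char) (hd : d ≠ []) (s : List Char) :
    pvSplitList d hd s ≠ [] := by
  rw [pvSplitList]
  split <;> simp

-- the boundary-value sequence, as B generates it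
def pvBSeq (d : List Char) (hd : d ≠ []) (s : List Char) (pos : Int) : List Int :=
  let k := PySem.Chars.find s d
  if h : k = -1 then []
  else (pos + k) :: pvBSeq d hd (List.drop (k.toNat + d.length) s) (pos + k)
  termination_by s.length
  decreasing_by
    have hk0 : 0 ≤ PySem.Chars.find s d := by
      have := PySem.Chars.neg_one_le_find s d
      omega
    have hinf : d <:+: s := (PySem.Chars.find_nonneg_iff s d).mp hk0
    have h1 : d.length ≤ s.length := hinf.length_le
    have hd1 : 1 ≤ d.length := by cases hl : d with | nil => exact absurd hl hd | cons a l => simp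
    simp [List.length_drop]
    omega

-- splitOn.go characterization
theorem pv_splitOn_go_eq (d : List Char) (hd : d ≠ []) :
    ∀ fuel s cur acc, s.length < fuel →
      PySem.Chars.splitOn.go d fuel s cur acc =
        acc.reverse ++ List.modifyHead (cur.reverse ++ ·) (pvSplitList d hd s) := by
  intro fuel
  induction fuel with
  | zero => intro s cur acc h; omega
  | succ fuel ih =>
    intro s cur acc h
    have hd1 : 1 ≤ d.length := by cases hl : d with | nil => exact absurd hl hd | cons a l => simp
    cases s with
    | nil =>
      simp only [PySem.Chars.splitOn.go]
      rw [pvSplitList]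
      simp [pv_find_nil d hd]
    | cons c rest =>
      simp only [PySem.Chars.splitOn.go]
      split_ifs with h1
      · -- d is a prefix: emit cur, restart after d
        rw [ih (List.drop d.length (c :: rest)) [] (cur.reverse :: acc)
          (by simp only [List.length_drop, List.length_cons] at h ⊢; omega)]
        conv_rhs => rw [pvSplitList]
        have hf : PySem.Chars.find (c :: rest) d = 0 := by rw [pv_find_cons]; simp [h1]
        simp only [hf]
        norm_num
        rcases hsp : pvSplitList d hd (List.drop d.length (c :: rest)) with _ | ⟨p, ps⟩
        · exact absurd hsp (pvSplitList_ne_nil d hd _)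
        · simp
      · -- d is not a prefix: keep c, continue
        rw [ih rest (c :: cur) acc (by simp only [List.length_cons] at h ⊢; omega)]
        by_cases h2 : PySem.Chars.find rest d = -1
        · have hf : PySem.Chars.find (c :: rest) d = -1 := by rw [pv_find_cons]; simp [h1, h2]
          conv_rhs => rw [pvSplitList]
          conv_lhs => rw [pvSplitList]
          simp [h2, hf]
        · have hk0 : 0 ≤ PySem.Chars.find rest d := by
            have := PySem.Chars.neg_one_le_find rest d
            omega
          have hf : PySem.Chars.find (c :: rest) d = 1 + PySem.Chars.find rest d := by
            rw [pv_find_cons]; simp [h1, h2]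
          have h3 : ¬ (1 + PySem.Chars.find rest d = -1) := by omega
          have h4 : (1 + PySem.Chars.find rest d).toNat = (PySem.Chars.find rest d).toNat + 1 := by omega
          conv_rhs => rw [pvSplitList]
          conv_lhs => rw [pvSplitList]
          simp only [hf, h2, dif_neg, not_false_iff]
          rw [dif_neg h3, h4]
          have h5 : (PySem.Chars.find rest d).toNat + 1 + d.length
              = ((PySem.Chars.find rest d).toNat + d.length) + 1 := by omega
          rw [h5, List.take_succ_cons, List.drop_succ_cons]
          simp [List.modifyHead]

theorem pv_splitOn_eq (d : List Char) (hd : d ≠ []) (s : List Char) :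
    PySem.Chars.splitOn s d = pvSplitList d hd s := by
  show PySem.Chars.splitOn.go d (s.length + 1) s [] [] = _
  rw [pv_splitOn_go_eq d hd (s.length + 1) s [] [] (by omega)]
  rcases hsp : pvSplitList d hd s with _ | ⟨p, ps⟩
  · exact absurd hsp (pvSplitList_ne_nil d hd s)
  · simp

-- the cumulative-position sequence, as A generates it
def pvPosSeq : List (List Char) → Int → List Int
  | [], _ => []
  | p :: ps, pos => (pos + p.length) :: pvPosSeq ps (pos + p.length)

theorem pv_posSeq_eq_bSeq (d : List Char) (hd : d ≠ []) :
    ∀ s pos, pvPosSeq ((pvSplitList d hd s).dropLast) pos = pvBSeq d hd s pos := by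
  intro s
  induction hn : s.length using Nat.strong_induction_on generalizing s with
  | _ n ih =>
    intro pos
    rw [pvSplitList, pvBSeq]
    by_cases h : PySem.Chars.find s d = -1
    · simp [h, pvPosSeq]
    · have hk0 : 0 ≤ PySem.Chars.find s d := by
        have := PySem.Chars.neg_one_le_find s d
        omega
      have hkl : PySem.Chars.find s d ≤ (s.length : Int) := PySem.Chars.find_le_length s d
      have hinf : d <:+: s := (PySem.Chars.find_nonneg_iff s d).mp hk0
      have hd1 : 1 ≤ d.length := by cases hl : d with | nil => exact absurd hl hd | cons a l => simp
      have hsl : d.length ≤ s.length := hinf.length_le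
      simp only [h, dif_neg, not_false_iff]
      rcases hsp : pvSplitList d hd (List.drop ((PySem.Chars.find s d).toNat + d.length) s)
        with _ | ⟨p, ps⟩
      · exact absurd hsp (pvSplitList_ne_nil d hd _)
      · rw [List.dropLast_cons_of_ne_nil (by simp)]
        rw [pvPosSeq]
        have hlen : ((List.take (PySem.Chars.find s d).toNat s).length : Int)
            = PySem.Chars.find s d := by
          simp [List.length_take]
          omega
        rw [hlen, ← hsp]
        congr 1
        exact ih (List.drop ((PySem.Chars.find s d).toNat + d.length) s).length
          (by simp [List.length_drop]; omega) _ rfl _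

-- A's fold produces exactly the Set.add-fold of the position sequence
theorem pv_foldA (l : List String) (b : PySem.Set Int) (pos : Int) :
    (l.foldl (fun (st : PySem.Set Int × Int) seg =>
        (PySem.Set.add st.1 (st.2 + PySem.Str.len seg), st.2 + PySem.Str.len seg)) (b, pos)).1
      = (pvPosSeq (l.map String.toList) pos).foldl PySem.Set.add b := by
  induction l generalizing b pos with
  | nil => simp [pvPosSeq]
  | cons x xs ih =>
    simp only [List.foldl_cons, List.map_cons, pvPosSeq]
    rw [ih]
    rfl

-- B's loop produces exactly the Set.add-fold of the boundary sequence
theorem pv_altGo_eq (s d : String) (hd : d.toList ≠ []) :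
    ∀ fuel count start (b : PySem.Set Int), s.toList.length + 1 ≤ fuel + start →
      extract_boundaries_py_alt_go s d fuel count start b
        = (pvBSeq d.toList hd (List.drop start s.toList)
            ((start : Int) - count * d.toList.length)).foldl PySem.Set.add b := by
  intro fuel
  induction fuel with
  | zero =>
    intro count start b hfuel
    rw [extract_boundaries_py_alt_go, pvBSeq]
    rw [List.drop_eq_nil_of_le (by omega)]
    simp [pv_find_nil d.toList hd]
  | succ fuel ih =>
    intro count start b hfuel
    rw [extract_boundaries_py_alt_go]
    by_cases hIdx : PySem.Str.findFrom s d (start : Int) = -1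
    · -- findFrom = -1 : the loop stops, the sequence is empty
      rw [if_pos hIdx, pvBSeq]
      have hfind : PySem.Chars.find (List.drop start s.toList) d.toList = -1 := by
        by_cases hk : start ≤ s.toList.length
        · rw [PySem.Str.findFrom_eq, PySem.Chars.findFrom_natCast s.toList d.toList start hk] at hIdx
          by_contra hne
          simp only [hne, if_false] at hIdx
          have hk0 : 0 ≤ PySem.Chars.find (List.drop start s.toList) d.toList := by
            have := PySem.Chars.neg_one_le_find (List.drop start s.toList) d.toList
            omega
          omega
        · rw [List.drop_eq_nil_of_le (by omega)]
          exact pv_find_nil d.toList hd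
      simp [hfind]
    · rw [if_neg hIdx]
      have hidx' : PySem.Chars.findFrom s.toList d.toList (start : Int) none ≠ -1 := by
        rw [← PySem.Str.findFrom_eq]; exact hIdx
      have hb := pvFindFrom_bounds s.toList d.toList start hidx'
      have hk : start ≤ s.toList.length := hb.1
      have h1 : PySem.Chars.find (List.drop start s.toList) d.toList ≠ -1 := by
        intro hc
        apply hIdx
        rw [PySem.Str.findFrom_eq, PySem.Chars.findFrom_natCast s.toList d.toList start hk]
        simp [hc]
      have hk0 : 0 ≤ PySem.Chars.find (List.drop start s.toList) d.toList := by
        have := PySem.Chars.neg_one_le_find (List.drop start s.toList) d.toList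
        omega
      have hrwi : PySem.Str.findFrom s d (start : Int)
          = (start : Int) + PySem.Chars.find (List.drop start s.toList) d.toList := by
        rw [PySem.Str.findFrom_eq, PySem.Chars.findFrom_natCast s.toList d.toList start hk]
        simp [h1]
      have hstep : (PySem.Str.findFrom s d (start : Int)).toNat + d.toList.length ≥ start + 1 := by
        have hd1 : 1 ≤ d.toList.length := by
          cases hl : d.toList with
          | nil => exact absurd hl hd
          | cons a l => simp
        omega
      refine Eq.trans (ih (count + 1) ((PySem.Str.findFrom s d (start : Int)).toNat + d.toList.length)
        (PySem.Set.add b (PySem.Str.findFrom s d (start : Int) - (count : Int) * PySem.Str.len d))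
        (by omega)) ?_
      have e1 : PySem.Str.findFrom s d (start : Int) - (count : Int) * PySem.Str.len d
          = ((start : Int) - (count : Int) * (d.toList.length : Int))
            + PySem.Chars.find (List.drop start s.toList) d.toList := by
        simp only [PySem.Str.len]
        rw [hrwi]; ring
      have hNat : (((PySem.Str.findFrom s d (start : Int)).toNat : Nat) : Int)
          = PySem.Str.findFrom s d (start : Int) := Int.toNat_of_nonneg (by omega)
      have e3 : (((PySem.Str.findFrom s d (start : Int)).toNat + d.toList.length : Nat) : Int)
            - ((count + 1 : Nat) : Int) * (d.toList.length : Int)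
          = ((start : Int) - (count : Int) * (d.toList.length : Int))
            + PySem.Chars.find (List.drop start s.toList) d.toList := by
        push_cast
        rw [hNat, hrwi]; ring
      have e2 : (PySem.Str.findFrom s d (start : Int)).toNat + d.toList.length
          = start + ((PySem.Chars.find (List.drop start s.toList) d.toList).toNat
              + d.toList.length) := by
        omega
      conv_rhs => rw [pvBSeq]
      rw [dif_neg h1, List.foldl_cons, List.drop_drop]
      rw [e1, e3, e2]

-- ===== VERDICT (by name: the statement is the Claim_ definition above) =====
theorem extract_boundaries_py_spec : Claim_equal_extract_boundaries_py := by
  intro segmentation delimiter _ hpre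
  unfold Spec_extract_boundaries_py
  have hdl : delimiter.toList ≠ [] := by
    intro hc
    apply hpre
    have h2 := congrArg String.ofList hc
    simpa using h2
  unfold extract_boundaries_py extract_boundaries_py_alt
  rw [if_neg hdl]
  rcases hs : PySem.Str.split? segmentation delimiter with _ | segs
  · exfalso
    have h := PySem.Str.split?_map segmentation delimiter
    rw [hs] at h
    simp [PySem.Chars.split?, List.isEmpty_iff, hdl] at h
  · have hmap : segs.map String.toList
        = PySem.Chars.splitOn segmentation.toList delimiter.toList := by
      have h := PySem.Str.split?_map segmentation delimiter
      rw [hs] at h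
      simpa [PySem.Chars.split?, List.isEmpty_iff, hdl] using h
    show (List.foldl (fun (st : PySem.Set Int × Int) seg =>
        (PySem.Set.add st.1 (st.2 + PySem.Str.len seg), st.2 + PySem.Str.len seg))
        (PySem.Set.empty, 0) (PySem.List.slice segs none (some (-1)))).1 = _
    rw [PySem.List.slice_to_neg_one, pv_foldA]
    rw [pv_altGo_eq segmentation delimiter hdl (segmentation.toList.length + 1) 0 0 PySem.Set.empty (by omega)]
    rw [List.map_dropLast, hmap, pv_splitOn_eq delimiter.toList hdl,
      pv_posSeq_eq_bSeq delimiter.toList hdl]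
    norm_num
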